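-- pv_equiv track=rewrite | github.com/alexander-morris/automated-hustlebot | test_accept_monitor.py | get_accept_match_score
-- ===== SOURCE A (Python) =====
-- def get_accept_match_score(text):
--     """Calculate how well the text matches 'Accept'"""
--     target = "Accept"
--     if not text:
--         return 0
--
--     # Convert to title case to ensure first letter is capital
--     text = text.title()
--
--     # Count matching characters in sequence
--     score = 0
--     last_match_pos = -1
--     for c in text:
--         if last_match_pos + 1 < len(target) and c == target[last_match_pos + 1]:
--             score += 1
--             last_match_pos += 1
--
--     return score
-- ===== SOURCE B (Python) =====
-- def get_accept_match_score(text):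
--     """Calculate how well the text matches 'Accept'"""
--     if not text:
--         return 0
--     text = text.title()
--     score = 0
--     pos = 0
--     for ch in "Accept":
--         i = text.find(ch, pos)
--         if i == -1:
--             break
--         score += 1
--         pos = i + 1
--     return score
-- ===== Notes on version B (the rewrite author's own statement) =====
-- stated objective: faster
-- what changed: Instead of scanning every character of the text in a Python-level loop with a matched-position counter, B iterates over the six characters of the fixed target and jumps to each next occurrence with str.find(ch, pos), so the per-character work runs inside the C string-search primitive.
import Mathlib
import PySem

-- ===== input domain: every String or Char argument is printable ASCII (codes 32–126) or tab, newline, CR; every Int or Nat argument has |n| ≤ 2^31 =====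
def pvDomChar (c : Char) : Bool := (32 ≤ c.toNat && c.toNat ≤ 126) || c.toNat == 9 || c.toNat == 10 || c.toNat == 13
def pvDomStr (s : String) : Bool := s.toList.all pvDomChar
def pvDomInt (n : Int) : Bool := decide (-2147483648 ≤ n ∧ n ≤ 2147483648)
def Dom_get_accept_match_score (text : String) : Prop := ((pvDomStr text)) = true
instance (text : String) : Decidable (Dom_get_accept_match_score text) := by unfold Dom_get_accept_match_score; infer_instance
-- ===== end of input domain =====

-- B keeps A's behaviour but loops over the six target characters with repeated find(ch, pos)
-- instead of scanning the text character by character: same result, different decomposition.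

-- shared helper: Python's str.title() for ASCII, ported by hand (exact on the ASCII domain:
-- a letter is uppercased after a non-letter and lowercased after a letter; others unchanged)
def pyTitleAux : Bool → List Char → List Char
  | _, [] => []
  | prevCased, c :: cs =>
      (if PySem.Chars.isalpha c then
         (if prevCased then PySem.Chars.lowerChar c else PySem.Chars.upperChar c)
       else c) :: pyTitleAux (PySem.Chars.isalpha c) cs

def pyTitle (s : List Char) : List Char := pyTitleAux false s

-- ===== PORT A =====
-- the for-loop over text with state (score, last_match_pos)
def aLoop (tgt : List Char) : List Char → Int × Int → Int × Int
  | [], st => st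
  | c :: cs, (score, lmp) =>
      if lmp + 1 < (tgt.length : Int) ∧ PySem.List.pyGet? tgt (lmp + 1) = some c then
        aLoop tgt cs (score + 1, lmp + 1)
      else
        aLoop tgt cs (score, lmp)

def get_accept_match_score (text : String) : Int :=
  let target := "Accept".toList
  if text = "" then 0
  else
    let text := pyTitle text.toList
    (aLoop target text (0, -1)).1

-- ===== PORT B =====
-- the for-loop over "Accept" with state (pos, score), break on find = -1
def altLoop (t : String) : List Char → Int → Int → Int
  | [], _, score => score
  | ch :: rest, pos, score =>
      let i := PySem.Str.findFrom t (String.ofList [ch]) pos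
      if i = -1 then score
      else altLoop t rest (i + 1) (score + 1)

def get_accept_match_score_alt (text : String) : Int :=
  if text = "" then 0
  else
    let t := String.ofList (pyTitle text.toList)
    altLoop t "Accept".toList 0 0

-- ===== PRECONDITION & SPEC =====
def Spec_get_accept_match_score (text : String) (out : Int) : Prop := out = get_accept_match_score_alt text
instance (text : String) (out : Int) : Decidable (Spec_get_accept_match_score text out) := by unfold Spec_get_accept_match_score; infer_instance

-- ===== CLAIM (what is proved, stated in full; the proofs are below) =====
def Claim_equal_get_accept_match_score : Prop := ∀ (text : String), Dom_get_accept_match_score text → Spec_get_accept_match_score text (get_accept_match_score text)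

-- ===== LEMMAS AND PROOFS =====

-- greedy subsequence count, proof-side reference form: for each remaining target char,
-- find its first occurrence and continue in the tail after it
def bCount : List Char → List Char → Int
  | [], _ => 0
  | t :: ts, s =>
      let i := PySem.Chars.find s [t]
      if i = -1 then 0 else 1 + bCount ts (s.drop (i.toNat + 1))

lemma find_eq_of (s sub : List Char) (j : ℕ) (h1 : sub <+: s.drop j)
    (h2 : ∀ i < j, ¬ sub <+: s.drop i) : PySem.Chars.find s sub = (j : Int) := by
  have hin : PySem.Chars.isIn sub s = true :=
    (PySem.Chars.exists_prefix_drop_iff_isIn ..).mp ⟨j, h1⟩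
  have hnn : 0 ≤ PySem.Chars.find s sub :=
    (PySem.Chars.find_nonneg_iff ..).mpr ((PySem.Chars.isIn_iff_infix ..).mp hin)
  obtain ⟨hpre, hmin⟩ := PySem.Chars.find_spec (s := s) (sub := sub) hnn
  have : (PySem.Chars.find s sub).toNat = j := by
    rcases lt_trichotomy (PySem.Chars.find s sub).toNat j with h | h | h
    · exact absurd hpre (h2 _ h)
    · exact h
    · exact absurd h1 (hmin j h)
  omega

lemma find_cons_self (c : Char) (s : List Char) : PySem.Chars.find (c :: s) [c] = 0 := by
  have := find_eq_of (c :: s) [c] 0 (by simp) (by omega)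
  simpa using this

lemma find_cons_ne (t c : Char) (s : List Char) (h : t ≠ c) :
    PySem.Chars.find (c :: s) [t] =
      if PySem.Chars.find s [t] = -1 then -1 else 1 + PySem.Chars.find s [t] := by
  by_cases hf : PySem.Chars.find s [t] = -1
  · rw [if_pos hf]
    rw [PySem.Chars.find_eq_neg_one_iff] at hf ⊢
    intro hinf
    apply hf
    rcases (List.infix_cons_iff).mp hinf with h1 | h2
    · rcases h1 with ⟨r, hr⟩
      cases hr
      exact absurd rfl h
    · exact h2
  · have hnn : 0 ≤ PySem.Chars.find s [t] := by
      have := PySem.Chars.neg_one_le_find s [t]; omega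
    obtain ⟨hpre, hmin⟩ := PySem.Chars.find_spec (s := s) (sub := [t]) hnn
    set f := (PySem.Chars.find s [t]).toNat with hfdef
    have hres : PySem.Chars.find (c :: s) [t] = ((f + 1 : ℕ) : Int) := by
      apply find_eq_of
      · simpa using hpre
      · intro i hi
        cases i with
        | zero =>
            simp only [List.drop_zero]
            intro hp
            rcases hp with ⟨r, hr⟩
            cases hr
            exact absurd rfl h
        | succ i' =>
            simp only [List.drop_succ_cons]
            exact hmin i' (by omega)
    rw [hres]
    simp only [if_neg hf]
    omega

lemma length_lt_of_find_single (s : List Char) (t : Char)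
    (h : PySem.Chars.find s [t] ≠ -1) : (PySem.Chars.find s [t]).toNat < s.length := by
  have hnn : 0 ≤ PySem.Chars.find s [t] := by
    have := PySem.Chars.neg_one_le_find s [t]; omega
  obtain ⟨hpre, _⟩ := PySem.Chars.find_spec (s := s) (sub := [t]) hnn
  have hlen : 1 ≤ (s.drop (PySem.Chars.find s [t]).toNat).length := hpre.length_le
  simp only [List.length_drop] at hlen
  omega

-- A's scan from k matched characters equals k plus the greedy count on the remaining target
lemma aLoop_eq_bCount (tgt : List Char) (s : List Char) :
    ∀ k : ℕ, k ≤ tgt.length →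
      (aLoop tgt s ((k : Int), (k : Int) - 1)).1 = (k : Int) + bCount (tgt.drop k) s := by
  induction s with
  | nil =>
      intro k hk
      cases h : tgt.drop k with
      | nil => simp [aLoop, bCount]
      | cons t ts => simp [aLoop, bCount, PySem.Chars.find_eq_neg_one_iff]
  | cons c cs ih =>
      intro k hk
      by_cases hlt : k < tgt.length
      · have hdrop : tgt.drop k = tgt[k] :: tgt.drop (k + 1) := List.drop_eq_getElem_cons hlt
        by_cases heq : tgt[k] = c
        · -- match: both advance
          have hcond : ((k : Int) - 1) + 1 < (tgt.length : Int) ∧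
              PySem.List.pyGet? tgt (((k : Int) - 1) + 1) = some c := by
            constructor
            · omega
            · have : ((k : Int) - 1) + 1 = ((k : ℕ) : Int) := by omega
              rw [this, PySem.List.pyGet?_natCast]
              simp [List.getElem?_eq_getElem hlt, heq]
          have hstep : aLoop tgt (c :: cs) ((k : Int), (k : Int) - 1)
              = aLoop tgt cs ((k : Int) + 1, ((k : Int) - 1) + 1) := by
            simp only [aLoop]
            rw [if_pos hcond]
          rw [hstep]
          have hre : (((k : Int) + 1, ((k : Int) - 1) + 1) : Int × Int)
              = (((k + 1 : ℕ) : Int), ((k + 1 : ℕ) : Int) - 1) := by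
            simp only [Prod.mk.injEq]
            omega
          rw [hre, ih (k + 1) (by omega), hdrop]
          subst heq
          simp only [bCount, find_cons_self]
          norm_num
          ring
        · -- no match on c: A skips c, B's find skips c too
          have hcond : ¬ (((k : Int) - 1) + 1 < (tgt.length : Int) ∧
              PySem.List.pyGet? tgt (((k : Int) - 1) + 1) = some c) := by
            rintro ⟨_, hg⟩
            have : ((k : Int) - 1) + 1 = ((k : ℕ) : Int) := by omega
            rw [this, PySem.List.pyGet?_natCast] at hg
            simp [List.getElem?_eq_getElem hlt] at hg
            exact heq hg
          have hstep : aLoop tgt (c :: cs) ((k : Int), (k : Int) - 1)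
              = aLoop tgt cs ((k : Int), (k : Int) - 1) := by
            simp only [aLoop, if_neg hcond]
          rw [hstep, ih k hk, hdrop]
          -- show bCount (tgt[k] :: ts) cs = bCount (tgt[k] :: ts) (c :: cs)
          have hfind := find_cons_ne tgt[k] c cs heq
          by_cases hf : PySem.Chars.find cs [tgt[k]] = -1
          · simp [bCount, hfind, hf]
          · have hnn : 0 ≤ PySem.Chars.find cs [tgt[k]] := by
              have := PySem.Chars.neg_one_le_find cs [tgt[k]]; omega
            have h1 : (1 + PySem.Chars.find cs [tgt[k]]) ≠ -1 := by omega
            have h2 : (1 + PySem.Chars.find cs [tgt[k]]).toNat + 1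
                = (PySem.Chars.find cs [tgt[k]]).toNat + 1 + 1 := by omega
            simp only [bCount, hfind, if_neg hf, if_neg h1, h2, List.drop_succ_cons]
      · -- target exhausted: k = tgt.length, nothing further matches
        have hk' : k = tgt.length := by omega
        have hcond : ¬ (((k : Int) - 1) + 1 < (tgt.length : Int) ∧
            PySem.List.pyGet? tgt (((k : Int) - 1) + 1) = some c) := by
          rintro ⟨hl, _⟩; omega
        have hstep : aLoop tgt (c :: cs) ((k : Int), (k : Int) - 1)
            = aLoop tgt cs ((k : Int), (k : Int) - 1) := by
          simp only [aLoop, if_neg hcond]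
        rw [hstep, ih k hk]
        simp [hk', List.drop_length, bCount]

-- B's pointer loop over the target equals the greedy count on the dropped text
lemma altLoop_eq_bCount (t : String) (ts : List Char) :
    ∀ (p : ℕ) (score : Int), p ≤ t.toList.length →
      altLoop t ts (p : Int) score = score + bCount ts (t.toList.drop p) := by
  induction ts with
  | nil => intro p score hp; simp [altLoop, bCount]
  | cons ch rest ih =>
      intro p score hp
      have hff : PySem.Str.findFrom t (String.ofList [ch]) (p : Int) none
          = if PySem.Chars.find (t.toList.drop p) [ch] = -1 then -1
            else (p : Int) + PySem.Chars.find (t.toList.drop p) [ch] := by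
        rw [PySem.Str.findFrom_eq]
        simp only [String.toList_ofList]
        exact PySem.Chars.findFrom_natCast t.toList [ch] p hp
      by_cases hf : PySem.Chars.find (t.toList.drop p) [ch] = -1
      · simp only [altLoop, hff, if_pos hf]
        simp [bCount, hf]
      · have hnn : 0 ≤ PySem.Chars.find (t.toList.drop p) [ch] := by
          have := PySem.Chars.neg_one_le_find (t.toList.drop p) [ch]; omega
        set f := (PySem.Chars.find (t.toList.drop p) [ch]).toNat with hfdef
        have hflt : f < (t.toList.drop p).length := length_lt_of_find_single _ _ hf
        simp only [List.length_drop] at hflt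
        have hne : ¬ ((p : Int) + PySem.Chars.find (t.toList.drop p) [ch] = -1) := by omega
        have hi1 : (p : Int) + PySem.Chars.find (t.toList.drop p) [ch] + 1
            = ((p + f + 1 : ℕ) : Int) := by omega
        have hstep : altLoop t (ch :: rest) (p : Int) score
            = altLoop t rest (((p + f + 1 : ℕ) : Int)) (score + 1) := by
          simp only [altLoop, hff, if_neg hf, if_neg hne]
          rw [hi1]
        rw [hstep, ih (p + f + 1) (score + 1) (by omega)]
        have hdd : t.toList.drop (p + f + 1) = (t.toList.drop p).drop (f + 1) := by
          rw [List.drop_drop]; ring_nf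
        simp only [bCount, if_neg hf, ← hfdef, hdd]
        ring

-- ===== VERDICT (by name: the statement is the Claim_ definition above) =====
theorem get_accept_match_score_spec : Claim_equal_get_accept_match_score := by
  intro text _
  unfold Spec_get_accept_match_score get_accept_match_score get_accept_match_score_alt
  by_cases h : text = ""
  · simp [h]
  · simp only [if_neg h]
    have hA := aLoop_eq_bCount "Accept".toList (pyTitle text.toList) 0 (by simp)
    have hB := altLoop_eq_bCount (String.ofList (pyTitle text.toList)) "Accept".toList 0 0 (by simp)
    simp only [Nat.cast_zero, List.drop_zero, String.toList_ofList, zero_add] at hA hB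
    norm_num at hA hB
    rw [hA]
    exact hB.symm
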